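-- pv_equiv track=rewrite | github.com/JOINYYz/jianzhiOffer | code/GetNumberOfK2.py | getrightK
-- ===== SOURCE A (Python) =====
-- def getrightK(data,k,left,right):###查找重复数字最右边的那个数字位置
--     while left<=right:
--         middle=(left+right)//2
--         if data[middle]<=k:
--             left=middle+1
--         else:
--             right=middle-1
--     return right
-- ===== SOURCE B (Python) =====
-- def _ubound(data, k, lo, hi):
--     # Insertion point after the last data[i] <= k within the half-open window [lo, hi).
--     if lo >= hi:
--         return hi
--     mid = (lo + hi - 1) // 2
--     if data[mid] <= k:
--         return _ubound(data, k, mid + 1, hi)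
--     return _ubound(data, k, lo, mid)
--
-- def getrightK(data, k, left, right):
--     # Half-open reformulation: compute the insertion point in [left, right+1), answer is one less.
--     return _ubound(data, k, left, right + 1) - 1
-- ===== Notes on version B (the rewrite author's own statement) =====
-- stated objective: alternative
-- what changed: A's imperative closed-interval [left,right] while-loop is replaced by a recursive half-open insertion-point search on [left,right+1) (a bisect_right-style helper) whose result minus one is returned.
-- outside the precondition, e.g. on getrightK([0, 0, 0], -1, 0, 5): A returns -1, B returns -1; on getrightK([1, 2, 3], 5, 0, 5): A raises IndexError, B raises IndexError
import Mathlib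
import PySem

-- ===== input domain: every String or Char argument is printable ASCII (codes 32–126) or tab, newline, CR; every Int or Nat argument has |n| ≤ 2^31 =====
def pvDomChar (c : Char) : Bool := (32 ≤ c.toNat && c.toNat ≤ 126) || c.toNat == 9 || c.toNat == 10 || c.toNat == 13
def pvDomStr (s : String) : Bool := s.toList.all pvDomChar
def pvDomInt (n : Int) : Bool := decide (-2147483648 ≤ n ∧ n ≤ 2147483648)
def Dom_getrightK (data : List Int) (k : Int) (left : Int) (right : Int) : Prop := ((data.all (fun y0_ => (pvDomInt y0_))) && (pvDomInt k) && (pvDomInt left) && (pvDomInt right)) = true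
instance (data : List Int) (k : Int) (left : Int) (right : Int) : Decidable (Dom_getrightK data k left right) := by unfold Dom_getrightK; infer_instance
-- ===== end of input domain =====

-- B recasts A's closed-interval while-loop as a half-open insertion-point recursion (answer = insertion point − 1); same value wherever both return.

-- ===== PORT A =====
-- A's while-loop, transliterated as a loop over the mutable state (left, right);
-- data[middle] is Python indexing: pyGet? (negative wraparound); the getD 0 branch is
-- unreachable under Pre_getrightK (where Python raises IndexError).
def getrightKLoop (data : List Int) (k : Int) (left : Int) (right : Int) : Int :=
  if left ≤ right then
    let middle := PySem.Int.floordiv (left + right) 2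
    if ((PySem.List.pyGet? data middle).getD 0) ≤ k then
      getrightKLoop data k (middle + 1) right
    else
      getrightKLoop data k left (middle - 1)
  else right
termination_by (right + 1 - left).toNat
decreasing_by
  · have h := PySem.Int.floordiv_two_mid_bounds (by assumption : left ≤ right)
    omega
  · have h := PySem.Int.floordiv_two_mid_bounds (by assumption : left ≤ right)
    omega

def getrightK (data : List Int) (k : Int) (left : Int) (right : Int) : Int :=
  getrightKLoop data k left right

-- ===== PORT B =====
-- B's helper _ubound: insertion point after the last data[i] ≤ k in the half-open window [lo, hi).
def ubound (data : List Int) (k : Int) (lo : Int) (hi : Int) : Int :=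
  if lo ≥ hi then hi
  else
    let mid := PySem.Int.floordiv (lo + hi - 1) 2
    if ((PySem.List.pyGet? data mid).getD 0) ≤ k then
      ubound data k (mid + 1) hi
    else
      ubound data k lo mid
termination_by (hi - lo).toNat
decreasing_by
  · have h := PySem.Int.floordiv_two_mid_bounds (show lo ≤ hi - 1 by omega)
    have e : lo + (hi - 1) = lo + hi - 1 := by ring
    rw [e] at h
    omega
  · have h := PySem.Int.floordiv_two_mid_bounds (show lo ≤ hi - 1 by omega)
    have e : lo + (hi - 1) = lo + hi - 1 := by ring
    rw [e] at h
    omega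

-- B: half-open reformulation; the insertion point in [left, right+1), minus one.
def getrightK_alt (data : List Int) (k : Int) (left : Int) (right : Int) : Int :=
  ubound data k left (right + 1) - 1

-- ===== PRECONDITION & SPEC =====
-- Pre_ excludes interval bounds that reach outside data's Python index range [-len, len):
-- there A usually raises IndexError; on a few such inputs the search happens to stay in
-- range and A still returns (B returns the same value there), see cites.
def Pre_getrightK (data : List Int) (k : Int) (left : Int) (right : Int) : Prop :=
  right < left ∨ (-(data.length : Int) ≤ left ∧ right < (data.length : Int))
instance (data : List Int) (k : Int) (left : Int) (right : Int) : Decidable (Pre_getrightK data k left right) := by unfold Pre_getrightK; infer_instance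

def pvWitness_getrightK : List Int × Int × Int × Int := ([1, 2, 2, 3], 2, 0, 3)

def Spec_getrightK (data : List Int) (k : Int) (left : Int) (right : Int) (out : Int) : Prop := out = getrightK_alt data k left right
instance (data : List Int) (k : Int) (left : Int) (right : Int) (out : Int) : Decidable (Spec_getrightK data k left right out) := by unfold Spec_getrightK; infer_instance

-- ===== CLAIM (what is proved, stated in full; the proofs are below) =====
def Claim_equal_getrightK : Prop := ∀ (data : List Int) (k : Int) (left : Int) (right : Int), Dom_getrightK data k left right → Pre_getrightK data k left right → Spec_getrightK data k left right (getrightK data k left right)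

-- ===== LEMMAS AND PROOFS =====
theorem ubound_eq_loop (data : List Int) (k : Int) (lo : Int) (hi : Int) :
    ubound data k lo hi = getrightKLoop data k lo (hi - 1) + 1 := by
  induction lo, hi using ubound.induct data k with
  | case1 lo hi hge =>
      rw [ubound, getrightKLoop, if_pos hge, if_neg (show ¬ lo ≤ hi - 1 by omega)]
      omega
  | case2 lo hi hlt mid hcmp ih =>
      have e : lo + (hi - 1) = lo + hi - 1 := by ring
      rw [ubound, getrightKLoop, if_neg hlt, if_pos (show lo ≤ hi - 1 by omega), e,
        if_pos hcmp, if_pos hcmp]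
      exact ih
  | case3 lo hi hlt mid hcmp ih =>
      have e : lo + (hi - 1) = lo + hi - 1 := by ring
      rw [ubound, getrightKLoop, if_neg hlt, if_pos (show lo ≤ hi - 1 by omega), e,
        if_neg hcmp, if_neg hcmp]
      rw [ih]

-- ===== VERDICT (by name: the statement is the Claim_ definition above) =====
theorem getrightK_spec : Claim_equal_getrightK := by
  intro data k left right _ _
  unfold Spec_getrightK getrightK getrightK_alt
  rw [ubound_eq_loop]
  have e : right + 1 - 1 = right := by ring
  rw [e]
  omega
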